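-- pv_equiv track=rewrite | github.com/minyeong981/Algorithm | 프로그래머스/2/42626. 더 맵게/더 맵게.py | solution
-- ===== SOURCE A (Python) =====
-- import heapq
--
-- def solution(scoville, K):
--     cnt = 0
--     isFlag = False
--     heapq.heapify(scoville)
--     while len(scoville) > 1 :
--         if scoville[0] >= K :
--             return cnt
--
--         v1 = heapq.heappop(scoville)
--         v2 = heapq.heappop(scoville)
--         heapq.heappush(scoville, (v1+(v2*2)))
--         cnt += 1
--
--     if scoville[0] >= K :
--         return cnt
--
--     return -1
-- ===== SOURCE B (Python) =====
-- def _insort(s, x):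
--     # insert x into ascending-sorted list s, keeping it sorted (after equal elements)
--     i = 0
--     while i < len(s) and s[i] <= x:
--         i += 1
--     s.insert(i, x)
--
-- def solution(scoville, K):
--     cnt = 0
--     s = sorted(scoville)
--     while len(s) > 1:
--         if s[0] >= K:
--             return cnt
--         v1 = s[0]
--         v2 = s[1]
--         s = s[2:]
--         _insort(s, v1 + v2 * 2)
--         cnt += 1
--     if s[0] >= K:
--         return cnt
--     return -1
-- ===== Notes on version B (the rewrite author's own statement) =====
-- stated objective: alternative
-- what changed: Replaces the binary heap with an ascending sorted list: B sorts once, takes the two smallest from the front and re-inserts the mix by ordered insertion, instead of heapify/heappop/heappush; B also leaves the argument unmutated (A heapifies it in place).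
import Mathlib
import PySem

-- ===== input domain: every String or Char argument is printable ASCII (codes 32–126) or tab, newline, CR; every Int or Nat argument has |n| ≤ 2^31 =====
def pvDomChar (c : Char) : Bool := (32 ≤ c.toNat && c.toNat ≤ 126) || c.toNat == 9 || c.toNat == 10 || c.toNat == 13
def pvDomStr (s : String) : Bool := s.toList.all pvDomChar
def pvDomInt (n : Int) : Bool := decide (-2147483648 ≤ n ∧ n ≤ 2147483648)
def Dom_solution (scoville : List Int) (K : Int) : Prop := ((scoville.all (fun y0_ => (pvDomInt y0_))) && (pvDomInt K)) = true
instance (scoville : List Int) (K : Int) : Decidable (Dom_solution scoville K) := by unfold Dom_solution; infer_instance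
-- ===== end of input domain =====

-- Return-value equivalence only: A heapifies its argument in place, B works on a sorted copy.
-- B replaces A's binary heap by an ascending sorted list maintained with ordered insertion (alternative data structure, not faster).


-- ===== PORT A =====
-- heapq calls are library calls, ported by their documented contract: after heapify the
-- root scoville[0] is the minimum, heappop removes one occurrence of the minimum, heappush
-- adds the element.  This is exact for the return value, which depends only on the heap's
-- multiset (equal Int values are indistinguishable, so which duplicate sits at the root is
-- irrelevant).
def aLoop (l : List Int) (K : Int) (cnt : Int) : Int :=
  if hlen : 1 < l.length then
    match hm : PySem.List.min? l (fun x => x) with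
    | none => -1  -- unreachable: l ≠ []
    | some v1 =>
      if v1 ≥ K then cnt
      else
        match hr1 : PySem.List.remove? l v1 with
        | none => -1  -- unreachable: v1 ∈ l
        | some l1 =>
          match hm2 : PySem.List.min? l1 (fun x => x) with
          | none => -1  -- unreachable: l1 ≠ []
          | some v2 =>
            match hr2 : PySem.List.remove? l1 v2 with
            | none => -1  -- unreachable: v2 ∈ l1
            | some l2 =>
              aLoop (l2 ++ [v1 + v2 * 2]) K (cnt + 1)
  else
    match l with
    | [] => -1  -- Python raises IndexError here; excluded by Pre_solution
    | v :: _ => if v ≥ K then cnt else -1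
termination_by l.length
decreasing_by
  have hv1 : v1 ∈ l := PySem.List.min?_mem hm
  have e1 := PySem.List.remove?_eq_some_erase l v1 hv1
  rw [hr1] at e1
  have hl1 : l1 = l.erase v1 := Option.some.inj e1
  have hv2 : v2 ∈ l1 := PySem.List.min?_mem hm2
  have e2 := PySem.List.remove?_eq_some_erase l1 v2 hv2
  rw [hr2] at e2
  have hl2 : l2 = l1.erase v2 := Option.some.inj e2
  have d1 : l1.length = l.length - 1 := hl1 ▸ List.length_erase_of_mem hv1
  have d2 : l2.length = l1.length - 1 := hl2 ▸ List.length_erase_of_mem hv2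
  simp only [List.length_append, List.length_cons, List.length_nil]
  omega

def solution (scoville : List Int) (K : Int) : Int :=
  aLoop scoville K 0

-- ===== PORT B =====
-- transliteration of Source B's linear-scan _insort : insert after all elements ≤ x
def insortLin (s : List Int) (x : Int) : List Int :=
  match s with
  | [] => [x]
  | y :: ys => if y ≤ x then y :: insortLin ys x else x :: y :: ys

theorem length_insortLin (s : List Int) (x : Int) :
    (insortLin s x).length = s.length + 1 := by
  induction s with
  | nil => rfl
  | cons y ys ih => simp only [insortLin]; split <;> simp [ih]

def bLoop (s : List Int) (K : Int) (cnt : Int) : Int :=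
  match s with
  | v1 :: v2 :: rest =>
      if v1 ≥ K then cnt
      else bLoop (insortLin rest (v1 + v2 * 2)) K (cnt + 1)
  | [v] => if v ≥ K then cnt else -1
  | [] => -1  -- Python raises IndexError here; excluded by Pre_solution
termination_by s.length
decreasing_by simp [length_insortLin]

def solution_alt (scoville : List Int) (K : Int) : Int :=
  bLoop (PySem.List.sorted scoville (fun x => x) false) K 0

-- ===== PRECONDITION & SPEC =====
-- Pre_ excludes only the empty list, on which both Pythons raise IndexError (scoville[0]).
def Pre_solution (scoville : List Int) (K : Int) : Prop := scoville ≠ []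
instance (scoville : List Int) (K : Int) : Decidable (Pre_solution scoville K) := by
  unfold Pre_solution; infer_instance
def pvWitness_solution : List Int × Int := ([1, 2, 3, 9, 10, 12], 7)

def Spec_solution (scoville : List Int) (K : Int) (out : Int) : Prop := out = solution_alt scoville K
instance (scoville : List Int) (K : Int) (out : Int) : Decidable (Spec_solution scoville K out) := by unfold Spec_solution; infer_instance

-- ===== CLAIM (what is proved, stated in full; the proofs are below) =====
def Claim_equal_solution : Prop := ∀ (scoville : List Int) (K : Int), Dom_solution scoville K → Pre_solution scoville K → Spec_solution scoville K (solution scoville K)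

-- ===== LEMMAS AND PROOFS =====

theorem perm_insortLin (s : List Int) (x : Int) :
    (insortLin s x).Perm (x :: s) := by
  induction s with
  | nil => rfl
  | cons y ys ih =>
    simp only [insortLin]
    split
    · exact ((ih.cons y).trans (List.Perm.swap x y ys))
    · rfl

theorem pairwise_insortLin (s : List Int) (x : Int)
    (hs : s.Pairwise (· ≤ ·)) : (insortLin s x).Pairwise (· ≤ ·) := by
  induction s with
  | nil => simp [insortLin]
  | cons y ys ih =>
    rcases List.pairwise_cons.mp hs with ⟨hy, hys⟩
    simp only [insortLin]
    split
    · rename_i hle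
      refine List.pairwise_cons.mpr ⟨?_, ih hys⟩
      intro z hz
      rcases List.mem_cons.mp ((perm_insortLin ys x).mem_iff.mp hz) with h | h
      · omega
      · exact hy z h
    · rename_i hlt
      refine List.pairwise_cons.mpr ⟨?_, hs⟩
      intro z hz
      rcases List.mem_cons.mp hz with h | h
      · omega
      · exact le_trans (by omega) (hy z h)

-- min of any permutation of a sorted list with head v is v
theorem min?_of_perm (l t : List Int) (v : Int)
    (hp : l.Perm (v :: t)) (hmin : ∀ y ∈ t, v ≤ y) :
    PySem.List.min? l (fun x => x) = some v := by
  have hne : l ≠ [] := by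
    intro h; subst h; exact (List.cons_ne_nil v t) (List.Perm.nil_eq hp).symm
  cases hm : PySem.List.min? l (fun x => x) with
  | none => exact absurd ((PySem.List.min?_eq_none_iff l (fun x => x)).mp hm) hne
  | some m =>
    have hmem : m ∈ l := PySem.List.min?_mem hm
    have hisMin : ∀ y ∈ l, m ≤ y := PySem.List.min?_isMin hm
    have hvl : v ∈ l := hp.mem_iff.mpr (List.mem_cons_self ..)
    have hmv : m ≤ v := hisMin v hvl
    have hvm : v ≤ m := by
      rcases List.mem_cons.mp (hp.mem_iff.mp hmem) with h | h
      · omega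
      · exact hmin m h
    have : m = v := le_antisymm hmv hvm
    rw [this]

-- main invariant: the heap loop and the sorted-list loop agree on any
-- permutation-related pair of states (the sorted side being ordered)
theorem aLoop_eq_bLoop (n : ℕ) (l s : List Int) (K cnt : Int)
    (hn : l.length ≤ n) (hp : l.Perm s) (hs : s.Pairwise (· ≤ ·)) :
    aLoop l K cnt = bLoop s K cnt := by
  induction n generalizing l s cnt with
  | zero =>
    have hl : l = [] := List.length_eq_zero_iff.mp (Nat.le_zero.mp hn)
    subst hl
    have hsnil : s = [] := (List.Perm.nil_eq hp).symm
    subst hsnil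
    simp [aLoop, bLoop]
  | succ n ih =>
    match s with
    | [] =>
      have hl : l = [] := hp.eq_nil
      subst hl
      simp [aLoop, bLoop]
    | [v] =>
      have hl1 : l.length = 1 := by simpa using hp.length_eq
      match l, hl1 with
      | [w], _ =>
        have hw : w = v := by
          simpa using hp.mem_iff.mp (List.mem_cons_self ..)
        subst hw
        simp [aLoop, bLoop]
    | v1 :: v2 :: rest =>
      have hlen : 1 < l.length := by
        have := hp.length_eq; simp at this; omega
      have hmin1 : ∀ y ∈ v2 :: rest, v1 ≤ y := (List.pairwise_cons.mp hs).1
      have hm1 : PySem.List.min? l (fun x => x) = some v1 :=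
        min?_of_perm l (v2 :: rest) v1 hp hmin1
      have hv1l : v1 ∈ l := hp.mem_iff.mpr (List.mem_cons_self ..)
      have hr1 : PySem.List.remove? l v1 = some (l.erase v1) :=
        PySem.List.remove?_eq_some_erase l v1 hv1l
      have hp1 : (l.erase v1).Perm (v2 :: rest) := by
        have := hp.erase v1
        simpa using this
      have hs1 : (v2 :: rest).Pairwise (· ≤ ·) := (List.pairwise_cons.mp hs).2
      have hmin2 : ∀ y ∈ rest, v2 ≤ y := (List.pairwise_cons.mp hs1).1
      have hm2 : PySem.List.min? (l.erase v1) (fun x => x) = some v2 :=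
        min?_of_perm (l.erase v1) rest v2 hp1 hmin2
      have hv2l : v2 ∈ l.erase v1 := hp1.mem_iff.mpr (List.mem_cons_self ..)
      have hr2 : PySem.List.remove? (l.erase v1) v2 = some ((l.erase v1).erase v2) :=
        PySem.List.remove?_eq_some_erase (l.erase v1) v2 hv2l
      have hp2 : ((l.erase v1).erase v2).Perm rest := by
        have := hp1.erase v2
        simpa using this
      rw [aLoop, bLoop]
      rw [dif_pos hlen]
      split
      · rename_i h
        rw [hm1] at h
        exact absurd h (by simp)
      · rename_i m h
        have hmv : m = v1 := (Option.some.inj (hm1.symm.trans h)).symm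
        subst hmv
        by_cases hK : m ≥ K
        · rw [if_pos hK, if_pos hK]
        · rw [if_neg hK, if_neg hK]
          split
          · rename_i h1
            rw [hr1] at h1
            exact absurd h1 (by simp)
          · rename_i l1 h1
            have hl1 : l1 = l.erase m := (Option.some.inj (hr1.symm.trans h1)).symm
            subst hl1
            split
            · rename_i h2
              rw [hm2] at h2
              exact absurd h2 (by simp)
            · rename_i m2 h2
              have hm2v : m2 = v2 := (Option.some.inj (hm2.symm.trans h2)).symm
              subst hm2v
              split
              · rename_i h3
                rw [hr2] at h3
                exact absurd h3 (by simp)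
              · rename_i l2 h3
                have hl2 : l2 = (l.erase m).erase m2 := (Option.some.inj (hr2.symm.trans h3)).symm
                subst hl2
                apply ih
                · have d1 : (l.erase m).length = l.length - 1 := List.length_erase_of_mem hv1l
                  have d2 : ((l.erase m).erase m2).length = (l.erase m).length - 1 :=
                    List.length_erase_of_mem hv2l
                  simp only [List.length_append, List.length_cons, List.length_nil]
                  omega
                · exact (List.perm_append_comm).trans
                    ((hp2.append_left [m + m2 * 2]).trans
                      ((perm_insortLin rest (m + m2 * 2)).symm))
                · exact pairwise_insortLin rest (m + m2 * 2) (List.pairwise_cons.mp hs1).2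

-- ===== VERDICT (by name: the statement is the Claim_ definition above) =====
theorem solution_spec : Claim_equal_solution := by
  intro scoville K _ _
  unfold Spec_solution solution solution_alt
  exact aLoop_eq_bLoop scoville.length scoville
    (PySem.List.sorted scoville (fun x => x) false) K 0 le_rfl
    (PySem.List.sorted_perm ..).symm
    (PySem.List.sorted_pairwise ..)
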